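-- pv_equiv track=rewrite | github.com/jiu6525/baekjoon | 프로그래머스/lv1/77884. 약수의 개수와 덧셈/약수의 개수와 덧셈.py | solution
-- ===== SOURCE A (Python) =====
-- def solution(left, right):
--     answer = 0
--     for n in range(left,right+1):
--         c = 0
--         for i in range(1,n+1):
--             if n%i==0:
--                 c += 1
--         if c%2 == 0:
--             answer += n
--         else:
--             answer -= n
--     return answer
-- ===== SOURCE B (Python) =====
-- def solution(left, right):
--     answer = 0
--     for n in range(left, right + 1):
--         c = 0
--         i = 1
--         while i * i <= n:
--             if n % i == 0:
--                 c += 1 if i * i == n else 2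
--             i += 1
--         if c % 2 == 0:
--             answer += n
--         else:
--             answer -= n
--     return answer
-- ===== Notes on version B (the rewrite author's own statement) =====
-- stated objective: alternative
-- what changed: The inner divisor count over 1..n is replaced by a square-root loop (while i*i <= n) counting divisor pairs, adding 2 per divisor below the square root and 1 at an exact square root; the outer loop over the range dominates, so overall cost is similar.
import Mathlib
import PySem

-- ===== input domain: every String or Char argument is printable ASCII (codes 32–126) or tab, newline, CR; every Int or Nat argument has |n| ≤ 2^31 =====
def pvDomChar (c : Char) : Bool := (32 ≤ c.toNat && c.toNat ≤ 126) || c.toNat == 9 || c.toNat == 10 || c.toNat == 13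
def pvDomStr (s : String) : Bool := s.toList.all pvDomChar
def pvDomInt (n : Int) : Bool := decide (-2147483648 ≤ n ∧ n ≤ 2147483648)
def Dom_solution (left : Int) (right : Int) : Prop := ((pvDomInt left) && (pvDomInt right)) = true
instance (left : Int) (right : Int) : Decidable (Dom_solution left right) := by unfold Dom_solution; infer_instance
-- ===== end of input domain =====

-- B replaces A's full 1..n inner divisor scan by a square-root loop counting divisor pairs.

-- ===== PORT A =====
def solution (left : Int) (right : Int) : Int :=
  (PySem.List.pyRange left (right + 1) 1).foldl (fun answer n =>
    let c := (PySem.List.pyRange 1 (n + 1) 1).foldl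
      (fun c i => if PySem.Int.mod n i == 0 then c + 1 else c) (0 : Int)
    if PySem.Int.mod c 2 == 0 then answer + n else answer - n) 0

-- ===== PORT B =====
-- the `while i * i <= n` loop of Source B (i starts at 1 and only increases, so it is a Nat here;
-- `fuel` is a totality guard only: the caller passes n.toNat + 1 ≥ the number of iterations, so the
-- loop always exits on its own `i * i ≤ n` test, exactly as in Python)
def bCount (n : Int) (fuel : Nat) (i : Nat) (c : Int) : Int :=
  match fuel with
  | 0 => c
  | fuel + 1 =>
    if (i : Int) * (i : Int) ≤ n then
      bCount n fuel (i + 1)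
        (if PySem.Int.mod n i == 0 then (if ((i : Int) * (i : Int) == n) then c + 1 else c + 2) else c)
    else c

def solution_alt (left : Int) (right : Int) : Int :=
  (PySem.List.pyRange left (right + 1) 1).foldl (fun answer n =>
    let c := bCount n (n.toNat + 1) 1 0
    if PySem.Int.mod c 2 == 0 then answer + n else answer - n) 0

-- ===== PRECONDITION & SPEC =====
def Spec_solution (left : Int) (right : Int) (out : Int) : Prop := out = solution_alt left right
instance (left : Int) (right : Int) (out : Int) : Decidable (Spec_solution left right out) := by unfold Spec_solution; infer_instance

-- ===== CLAIM (what is proved, stated in full; the proofs are below) =====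
def Claim_equal_solution : Prop := ∀ (left : Int) (right : Int), Dom_solution left right → Spec_solution left right (solution left right)

-- ===== LEMMAS AND PROOFS =====

-- indicator: 1 iff n is the square of some natural k with i ≤ k (that k is then Nat.sqrt n.toNat)
def sqFrom (n : Int) (i : Nat) : Int :=
  if ((Nat.sqrt n.toNat : Int) * (Nat.sqrt n.toNat) = n ∧ i ≤ Nat.sqrt n.toNat) then 1 else 0

-- A's inner count as a named function
def aCount (n : Int) : Int :=
  (PySem.List.pyRange 1 (n + 1) 1).foldl
    (fun c i => if PySem.Int.mod n i == 0 then c + 1 else c) (0 : Int)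

-- generic: a finset carrying an involution has the parity of the involution's fixed-point set
lemma invol_parity {α : Type} [DecidableEq α] (f : α → α) (s : Finset α)
    (hf : ∀ a ∈ s, f a ∈ s) (hff : ∀ a ∈ s, f (f a) = a) :
    s.card % 2 = (s.filter fun a => f a = a).card % 2 := by
  induction s using Finset.strongInduction with
  | _ s ih =>
    by_cases hall : ∀ a ∈ s, f a = a
    · rw [Finset.filter_eq_self.mpr hall]
    · push Not at hall
      obtain ⟨a, ha, hfa⟩ := hall
      have hb : f a ∈ s := hf a ha
      have hba : f a ≠ a := hfa
      set t := (s.erase a).erase (f a) with ht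
      have htsub : t ⊆ s := fun x hx => Finset.mem_of_mem_erase (Finset.mem_of_mem_erase hx)
      have hmem_t : ∀ x, x ∈ t ↔ x ≠ f a ∧ x ≠ a ∧ x ∈ s := by
        intro x
        simp [ht, Finset.mem_erase]
      have hproper : t ⊂ s := by
        refine Finset.ssubset_iff_of_subset htsub |>.mpr ⟨a, ha, ?_⟩
        rw [hmem_t]; tauto
      have hft : ∀ x ∈ t, f x ∈ t := by
        intro x hx
        obtain ⟨hxfa, hxa, hxs⟩ := (hmem_t x).mp hx
        rw [hmem_t]
        refine ⟨?_, ?_, hf x hxs⟩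
        · intro h; exact hxa (by rw [← hff x hxs, h, hff a ha])
        · intro h; exact hxfa (by rw [← hff x hxs, h])
      have hfft : ∀ x ∈ t, f (f x) = x := fun x hx => hff x (htsub hx)
      have hih := ih t hproper hft hfft
      have h1 : (s.erase a).card + 1 = s.card := Finset.card_erase_add_one ha
      have h2 : t.card + 1 = (s.erase a).card :=
        Finset.card_erase_add_one (Finset.mem_erase.mpr ⟨hba, hb⟩)
      have hfilter : s.filter (fun x => f x = x) = t.filter (fun x => f x = x) := by
        apply Finset.ext
        intro x
        simp only [Finset.mem_filter, hmem_t]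
        constructor
        · rintro ⟨hxs, hfx⟩
          refine ⟨⟨?_, ?_, hxs⟩, hfx⟩
          · intro h; subst h; exact hba (by rw [hff a ha] at hfx; exact hfx.symm)
          · intro h; subst h; exact hfa hfx
        · rintro ⟨⟨_, _, hxs⟩, hfx⟩; exact ⟨hxs, hfx⟩
      rw [hfilter]
      omega

-- the set A's inner loop counts, for n = (m : Int)
def divSet (m : Nat) : Finset Nat := (Finset.Ico 1 (m + 1)).filter (fun d => d ∣ m)

lemma mem_divSet (m d : Nat) : d ∈ divSet m ↔ 1 ≤ d ∧ d < m + 1 ∧ d ∣ m := by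
  simp [divSet, Finset.mem_filter, Finset.mem_Ico, and_assoc]

lemma aCount_eq_card (m : Nat) : aCount (m : Int) = ((divSet m).card : Int) := by
  unfold aCount divSet
  rw [PySem.List.pyRange_one, PySem.List.foldl_count_if]
  have hm : ((m : Int) + 1 - 1).toNat = m := by omega
  rw [hm, List.countP_map, zero_add]
  have hcard : ((Finset.Ico 1 (m+1)).filter (fun d => d ∣ m)).card
      = ((Finset.range m).filter (fun k => (k+1) ∣ m)).card := by
    apply Finset.card_bij (fun a _ => a - 1)
    · intro a ha; simp only [Finset.mem_filter, Finset.mem_Ico, Finset.mem_range] at *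
      constructor
      · omega
      · have : a - 1 + 1 = a := by omega
        rw [this]; exact ha.2
    · intro a ha b hb h; simp only [Finset.mem_filter, Finset.mem_Ico] at *; omega
    · intro b hb; simp only [Finset.mem_filter, Finset.mem_range, Finset.mem_Ico] at *
      exact ⟨b+1, ⟨⟨by omega, by omega⟩, hb.2⟩, by omega⟩
  rw [hcard]
  have hc2 : ((Finset.range m).filter (fun k => (k+1) ∣ m)).card
      = (List.range m).countP (fun k => decide ((k+1) ∣ m)) := by
    simp [Finset.filter, Finset.card, Finset.range, Multiset.range, List.countP_eq_length_filter]
  rw [hc2]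
  congr 1
  apply List.countP_congr
  intro k _
  simp only [Function.comp_apply, beq_iff_eq, decide_eq_true_eq, PySem.Int.mod_eq_zero_iff_dvd]
  rw [Int.add_comm]
  norm_cast

lemma divSet_card_parity (m : Nat) (hm : 1 ≤ m) :
    (divSet m).card % 2 = (if Nat.sqrt m * Nat.sqrt m = m then 1 else 0) % 2 := by
  have hf : ∀ d ∈ divSet m, m / d ∈ divSet m := by
    intro d hd
    rw [mem_divSet] at *
    obtain ⟨h1, _, hdvd⟩ := hd
    refine ⟨?_, ?_, Nat.div_dvd_of_dvd hdvd⟩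
    · exact (Nat.one_le_div_iff (by omega)).mpr (Nat.le_of_dvd (by omega) hdvd)
    · have := Nat.div_le_self m d; omega
  have hff : ∀ d ∈ divSet m, m / (m / d) = d := by
    intro d hd
    rw [mem_divSet] at hd
    exact Nat.div_div_self hd.2.2 (by omega)
  have hkey := invol_parity (fun d => m / d) (divSet m) hf hff
  rw [hkey]
  by_cases h : Nat.sqrt m * Nat.sqrt m = m
  · have hr1 : 1 ≤ Nat.sqrt m := by
      rcases Nat.eq_zero_or_pos (Nat.sqrt m) with h0 | h0
      · rw [h0] at h; omega
      · exact h0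
    have hfix : ((divSet m).filter fun d => m / d = d) = {Nat.sqrt m} := by
      apply Finset.ext
      intro d
      simp only [Finset.mem_filter, Finset.mem_singleton, mem_divSet]
      constructor
      · rintro ⟨⟨hd1, _, hdvd⟩, hfixd⟩
        have hdd : d * d = m := by
          have := Nat.div_mul_cancel hdvd
          rw [hfixd] at this; exact this
        have : Nat.sqrt m = d := by rw [← hdd]; exact Nat.sqrt_eq d
        omega
      · rintro rfl
        refine ⟨⟨hr1, ?_, ⟨Nat.sqrt m, h.symm⟩⟩, ?_⟩
        · have : Nat.sqrt m ≤ Nat.sqrt m * Nat.sqrt m := Nat.le_mul_of_pos_left _ hr1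
          omega
        · exact Nat.div_eq_of_eq_mul_left hr1 h.symm
    rw [hfix, if_pos h, Finset.card_singleton]
  · have hfix : ((divSet m).filter fun d => m / d = d) = ∅ := by
      apply Finset.ext
      intro d
      simp only [Finset.mem_filter, Finset.notMem_empty, iff_false, mem_divSet]
      rintro ⟨⟨hd1, _, hdvd⟩, hfixd⟩
      have hdd : d * d = m := by
        have := Nat.div_mul_cancel hdvd
        rw [hfixd] at this; exact this
      have : Nat.sqrt m = d := by rw [← hdd]; exact Nat.sqrt_eq d
      apply h; rw [this]; exact hdd
    rw [hfix, if_neg h, Finset.card_empty]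

lemma aCount_parity (n : Int) : aCount n % 2 = sqFrom n 1 % 2 := by
  rcases le_or_gt n 0 with hn | hn
  · have hnil : PySem.List.pyRange 1 (n + 1) 1 = [] := by
      rw [PySem.List.pyRange_one]
      have : (n + 1 - 1).toNat = 0 := by omega
      rw [this]; rfl
    have ha : aCount n = 0 := by unfold aCount; rw [hnil]; rfl
    have hs : sqFrom n 1 = 0 := by
      unfold sqFrom
      rw [if_neg]
      rintro ⟨h1, h2⟩
      have hge : (0 : Int) ≤ (Nat.sqrt n.toNat : Int) * (Nat.sqrt n.toNat) := by positivity
      have hn0 : n = 0 := by omega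
      rw [hn0] at h2
      simp at h2
    rw [ha, hs]
  · obtain ⟨m, rfl⟩ : ∃ m : Nat, n = (m : Int) := ⟨n.toNat, by omega⟩
    have hm : 1 ≤ m := by exact_mod_cast hn
    rw [aCount_eq_card m]
    have hr : ((m : Int)).toNat = m := Int.toNat_natCast m
    have hs : sqFrom (m : Int) 1 = ((if Nat.sqrt m * Nat.sqrt m = m then 1 else 0 : Nat) : Int) := by
      unfold sqFrom
      rw [hr]
      by_cases h : Nat.sqrt m * Nat.sqrt m = m
      · have hr1 : 1 ≤ Nat.sqrt m := by
          rcases Nat.eq_zero_or_pos (Nat.sqrt m) with h0 | h0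
          · rw [h0] at h; omega
          · exact h0
        have hcast : (Nat.sqrt m : Int) * (Nat.sqrt m) = (m : Int) := by exact_mod_cast h
        simp [hcast, hr1, h]
      · have hcast : ¬ ((Nat.sqrt m : Int) * (Nat.sqrt m) = (m : Int)) := fun hc => h (by exact_mod_cast hc)
        simp [hcast, h]
    rw [hs]
    have := divSet_card_parity m hm
    omega

lemma bCount_parity (fuel : Nat) : ∀ (n : Int) (i : Nat) (c : Int), 1 ≤ i → n.toNat + 1 ≤ i + fuel →
    bCount n fuel i c % 2 = (c + sqFrom n i) % 2 := by
  induction fuel with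
  | zero =>
    intro n i c hi hfuel
    have hs : sqFrom n i = 0 := by
      unfold sqFrom
      rw [if_neg]
      rintro ⟨h1, h2⟩
      have := Nat.sqrt_le_self n.toNat
      omega
    simp [bCount, hs]
  | succ fuel ih =>
    intro n i c hi hfuel
    rw [bCount]
    by_cases h : (i : Int) * (i : Int) ≤ n
    · rw [if_pos h]
      have hih := ih n (i + 1) (if PySem.Int.mod n i == 0 then (if ((i : Int) * (i : Int) == n) then c + 1 else c + 2) else c) (by omega) (by omega)
      rw [hih]
      by_cases hsq : (i : Int) * (i : Int) = n
      · -- exact square root reached: one divisor counted, indicator moves from 1 to 0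
        have hdvd : (i : Int) ∣ n := ⟨i, hsq.symm⟩
        have hmod : PySem.Int.mod n i = 0 := (PySem.Int.mod_eq_zero_iff_dvd n i).mpr hdvd
        have hipos : (0 : Int) ≤ (i : Int) * (i : Int) := by positivity
        have htn : n.toNat = i * i := by omega
        have hri : Nat.sqrt n.toNat = i := by rw [htn]; exact Nat.sqrt_eq i
        have hs1 : sqFrom n i = 1 := by
          unfold sqFrom
          rw [hri, if_pos ⟨by exact_mod_cast hsq, le_rfl⟩]
        have hs2 : sqFrom n (i + 1) = 0 := by
          unfold sqFrom
          rw [hri, if_neg]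
          rintro ⟨_, hle⟩; omega
        rw [hs1, hs2]
        simp only [hmod]
        norm_num [hsq]
      · -- below the square root: 0 or 2 added, indicator unchanged
        have hs12 : sqFrom n (i + 1) = sqFrom n i := by
          unfold sqFrom
          by_cases hsqr : (Nat.sqrt n.toNat : Int) * (Nat.sqrt n.toNat) = n
          · have hir : i ≠ Nat.sqrt n.toNat := by
              intro hcontra
              apply hsq
              rw [hcontra]; exact hsqr
            by_cases hle : i ≤ Nat.sqrt n.toNat
            · rw [if_pos ⟨hsqr, by omega⟩, if_pos ⟨hsqr, hle⟩]
            · rw [if_neg (by rintro ⟨_, h2⟩; omega), if_neg (by rintro ⟨_, h2⟩; omega)]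
          · rw [if_neg (by rintro ⟨h1, _⟩; exact hsqr h1), if_neg (by rintro ⟨h1, _⟩; exact hsqr h1)]
        rw [hs12]
        have hne : ((i : Int) * (i : Int) == n) = false := by
          simp [hsq]
        by_cases hmod : PySem.Int.mod n i == 0
        · simp [hmod, hne]
          omega
        · simp only [hmod]
          simp
    · rw [if_neg h]
      have hs : sqFrom n i = 0 := by
        unfold sqFrom
        rw [if_neg]
        rintro ⟨h1, h2⟩
        apply h
        calc (i : Int) * (i : Int) ≤ (Nat.sqrt n.toNat : Int) * (Nat.sqrt n.toNat) := by
              have : (i : Int) ≤ (Nat.sqrt n.toNat : Int) := by exact_mod_cast h2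
              exact mul_le_mul this this (by positivity) (by positivity)
          _ = n := h1
      rw [hs]
      omega

lemma count_parity_eq (n : Int) :
    (PySem.Int.mod (aCount n) 2 == 0) = (PySem.Int.mod (bCount n (n.toNat + 1) 1 0) 2 == 0) := by
  have h2 : (0 : Int) < 2 := by norm_num
  rw [PySem.Int.mod_eq_emod_of_pos h2, PySem.Int.mod_eq_emod_of_pos h2]
  have hb := bCount_parity (n.toNat + 1) n 1 0 le_rfl (by omega)
  rw [hb, aCount_parity n]
  simp

-- ===== VERDICT (by name: the statement is the Claim_ definition above) =====
theorem solution_spec : Claim_equal_solution := by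
  intro left right _
  unfold Spec_solution solution solution_alt
  have hstep : (fun (answer n : Int) =>
      let c := (PySem.List.pyRange 1 (n + 1) 1).foldl
        (fun c i => if PySem.Int.mod n i == 0 then c + 1 else c) (0 : Int)
      if PySem.Int.mod c 2 == 0 then answer + n else answer - n)
      = (fun (answer n : Int) =>
      let c := bCount n (n.toNat + 1) 1 0
      if PySem.Int.mod c 2 == 0 then answer + n else answer - n) := by
    funext a n
    show (if PySem.Int.mod (aCount n) 2 == 0 then a + n else a - n)
       = (if PySem.Int.mod (bCount n (n.toNat + 1) 1 0) 2 == 0 then a + n else a - n)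
    rw [count_parity_eq n]
  rw [hstep]
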